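-- pv_equiv track=rewrite | github.com/quangthai87vn/NLP-DialogueSystems | tod_simulator/run_tod_simulator_batch_85.py | choose_next
-- ===== SOURCE A (Python) =====
-- from typing import Dict, Any, List, Optional, Tuple
--
-- POLICY_PRIORITY = {
--     "movie": ["movie", "theater", "date", "time", "tickets"],
--     "navigation": ["destination", "origin", "mode", "avoid", "time"],
-- }
--
-- def choose_next(domain: str, mi: List[str], mb: List[str]) -> Optional[str]:
--     cand = mi + mb
--     if not cand:
--         return None
--     for p in POLICY_PRIORITY[domain]:
--         if p in cand:
--             return p
--     return cand[0]
-- ===== SOURCE B (Python) =====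
-- from typing import Dict, Any, List, Optional, Tuple
--
-- POLICY_PRIORITY = {
--     "movie": ["movie", "theater", "date", "time", "tickets"],
--     "navigation": ["destination", "origin", "mode", "avoid", "time"],
-- }
--
-- def choose_next(domain: str, mi: List[str], mb: List[str]) -> Optional[str]:
--     candidates = mi + mb
--     if not candidates:
--         return None
--     rank = {slot: i for i, slot in enumerate(POLICY_PRIORITY[domain])}
--     best = None  # (rank, slot) with the smallest rank seen so far
--     for slot in candidates:
--         r = rank.get(slot)
--         if r is not None and (best is None or r < best[0]):
--             best = (r, slot)
--     return best[1] if best is not None else candidates[0]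
-- ===== Notes on version B (the rewrite author's own statement) =====
-- stated objective: alternative
-- what changed: Instead of scanning the priority list and testing membership in the candidates for each slot, B builds a slot->index rank dict once and makes a single pass over the candidates keeping the candidate of minimal rank, falling back to cand[0].
import Mathlib
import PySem

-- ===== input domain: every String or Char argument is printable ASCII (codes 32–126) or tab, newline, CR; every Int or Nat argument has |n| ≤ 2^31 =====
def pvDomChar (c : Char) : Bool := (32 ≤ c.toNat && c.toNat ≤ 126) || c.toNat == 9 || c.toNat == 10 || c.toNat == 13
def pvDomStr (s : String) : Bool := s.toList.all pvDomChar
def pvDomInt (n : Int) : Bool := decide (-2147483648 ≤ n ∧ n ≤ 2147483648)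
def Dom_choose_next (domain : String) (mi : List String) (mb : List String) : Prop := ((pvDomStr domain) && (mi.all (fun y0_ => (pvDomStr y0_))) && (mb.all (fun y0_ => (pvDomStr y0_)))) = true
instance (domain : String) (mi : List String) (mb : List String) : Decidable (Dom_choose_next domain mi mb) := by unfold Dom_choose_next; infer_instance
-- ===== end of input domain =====

-- B replaces A's priority-list scan with a rank dict and one min-rank pass over the candidates;
-- same results (alternative decomposition, no speed claim).

-- ===== PORT A =====
-- module constant POLICY_PRIORITY (shared by both ports, as in the Python module)
def pvPolicy : PySem.Dict String (List String) :=
  PySem.Dict.ofList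
    [("movie", ["movie", "theater", "date", "time", "tickets"]),
     ("navigation", ["destination", "origin", "mode", "avoid", "time"])]

-- A's 'for p in POLICY_PRIORITY[domain]: if p in cand: return p' loop
def pvFindA (cand : List String) : List String → Option String
  | [] => none
  | p :: ps => if cand.contains p then some p else pvFindA cand ps

def choose_next (domain : String) (mi : List String) (mb : List String) : Option String :=
  let cand := mi ++ mb
  if cand = [] then none
  else
    match pvPolicy.get? domain with
    | none => none   -- Python raises KeyError here; excluded by Pre_choose_next
    | some ps =>
      match pvFindA cand ps with
      | some p => some p
      | none => PySem.List.pyGet? cand 0   -- cand[0]; cand is nonempty here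

-- ===== PORT B =====
-- rank = {s: i for i, s in enumerate(ps)}
def pvRankDict (ps : List String) : PySem.Dict String Int :=
  (PySem.List.enumerate ps 0).foldl (fun d p => d.insert p.2 p.1) PySem.Dict.empty

-- one step of B's loop body, over an abstract lookup R (= rank.get)
def pvBestStep (R : String → Option Int) (best : Option (Int × String)) (c : String) :
    Option (Int × String) :=
  match R c with
  | none => best
  | some r =>
    match best with
    | none => some (r, c)
    | some b => if r < b.1 then some (r, c) else best

def choose_next_alt (domain : String) (mi : List String) (mb : List String) : Option String :=
  let cand := mi ++ mb
  if cand = [] then none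
  else
    match pvPolicy.get? domain with
    | none => none   -- Python raises KeyError here; excluded by Pre_choose_next
    | some ps =>
      let rank := pvRankDict ps
      match cand.foldl (pvBestStep (fun c => rank.get? c)) none with
      | some b => some b.2
      | none => PySem.List.pyGet? cand 0   -- cand[0]; cand is nonempty here

-- ===== PRECONDITION & SPEC =====
-- Pre_ excludes exactly the inputs where Python's POLICY_PRIORITY[domain] raises KeyError:
-- a nonempty candidate list with a domain other than "movie"/"navigation" (both A and B raise there).
def Pre_choose_next (domain : String) (mi : List String) (mb : List String) : Prop :=
  mi ++ mb = [] ∨ domain = "movie" ∨ domain = "navigation"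
instance (domain : String) (mi : List String) (mb : List String) : Decidable (Pre_choose_next domain mi mb) := by unfold Pre_choose_next; infer_instance

def pvWitness_choose_next : String × List String × List String := ("movie", ["date"], ["time", "date"])

def Spec_choose_next (domain : String) (mi : List String) (mb : List String) (out : Option String) : Prop := out = choose_next_alt domain mi mb
instance (domain : String) (mi : List String) (mb : List String) (out : Option String) : Decidable (Spec_choose_next domain mi mb out) := by unfold Spec_choose_next; infer_instance

-- ===== CLAIM (what is proved, stated in full; the proofs are below) =====
def Claim_equal_choose_next : Prop := ∀ (domain : String) (mi : List String) (mb : List String), Dom_choose_next domain mi mb → Pre_choose_next domain mi mb → Spec_choose_next domain mi mb (choose_next domain mi mb)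

-- ===== LEMMAS AND PROOFS =====

-- first-index rank function: the mathematical reading of B's rank dict
def pvRidx (ps : List String) (c : String) : Option Int := (ps.idxOf? c).map (fun n => (n : Int))

lemma pvRidx_nil (c : String) : pvRidx [] c = none := rfl

lemma pvRidx_cons (p : String) (ps : List String) (c : String) :
    pvRidx (p :: ps) c = if c = p then some 0 else (pvRidx ps c).map (· + 1) := by
  by_cases h : c = p
  · simp [pvRidx, List.idxOf?, List.findIdx?_cons, h]
  · simp only [pvRidx, List.idxOf?, List.findIdx?_cons, h, if_false]
    have hpc : (p == c) = false := by simp [Ne.symm h]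
    simp only [hpc]
    cases List.findIdx? (fun x => x == c) ps <;> simp

lemma pvRidx_nonneg (ps : List String) (c : String) (n : Int) (h : pvRidx ps c = some n) :
    0 ≤ n := by
  unfold pvRidx at h
  cases hx : ps.idxOf? c with
  | none => rw [hx] at h; simp at h
  | some k => rw [hx] at h; simp at h; omega

-- if every element has no rank, the fold keeps its accumulator
lemma pvFold_none (R : String → Option Int) (l : List String) (b : Option (Int × String))
    (h : ∀ c ∈ l, R c = none) : l.foldl (pvBestStep R) b = b := by
  induction l generalizing b with
  | nil => rfl
  | cons c t ih =>
    have hc := h c (by simp)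
    simp [pvBestStep, hc]
    exact ih _ (fun x hx => h x (by simp [hx]))

-- once the minimal-rank pair is the accumulator, it stays
lemma pvFold_keep (R : String → Option Int) (l : List String) (r : Int) (s : String)
    (hmin : ∀ c ∈ l, ∀ rc, R c = some rc → r ≤ rc) :
    l.foldl (pvBestStep R) (some (r, s)) = some (r, s) := by
  induction l with
  | nil => rfl
  | cons c t ih =>
    have step : pvBestStep R (some (r, s)) c = some (r, s) := by
      unfold pvBestStep
      cases hR : R c with
      | none => rfl
      | some rc =>
        have := hmin c (by simp) rc hR
        simp [show ¬ rc < r by omega]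
    rw [List.foldl_cons, step]
    exact ih (fun x hx rc h => hmin x (by simp [hx]) rc h)

-- if s ∈ l has the unique minimal rank r, the fold from a "good" accumulator returns (r, s)
lemma pvFold_min (R : String → Option Int) (l : List String) (r : Int) (s : String)
    (hs : s ∈ l) (hr : R s = some r)
    (hmin : ∀ c ∈ l, ∀ rc, R c = some rc → r ≤ rc)
    (huniq : ∀ c ∈ l, R c = some r → c = s) :
    ∀ b, (b = none ∨ ∃ r' c', b = some (r', c') ∧ r ≤ r' ∧ (r' = r → c' = s)) →
    l.foldl (pvBestStep R) b = some (r, s) := by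
  induction l with
  | nil => exact absurd hs (by simp)
  | cons c t ih =>
    intro b hb
    by_cases hcs : c = s
    · subst hcs
      have step : pvBestStep R b c = some (r, c) := by
        unfold pvBestStep
        rw [hr]
        rcases hb with h | ⟨r', c', h, hle, heq⟩
        · simp [h]
        · subst h
          by_cases hlt : r < r'
          · simp [hlt]
          · have : r' = r := by omega
            simp [this, heq this]
      rw [List.foldl_cons, step]
      exact pvFold_keep R t r c (fun x hx rc h => hmin x (by simp [hx]) rc h)
    · have hst : s ∈ t := by
        rcases List.mem_cons.mp hs with h | h
        · exact absurd h.symm hcs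
        · exact h
      rw [List.foldl_cons]
      apply ih hst (fun x hx rc h => hmin x (by simp [hx]) rc h)
        (fun x hx h => huniq x (by simp [hx]) h)
      unfold pvBestStep
      cases hR : R c with
      | none => exact hb
      | some rc =>
        have hrc : r ≤ rc := hmin c (by simp) rc hR
        have hrcu : rc = r → c = s := fun h => huniq c (by simp) (h ▸ hR)
        rcases hb with h | ⟨r', c', h, hle, heq⟩
        · subst h; exact Or.inr ⟨rc, c, rfl, hrc, hrcu⟩
        · subst h
          by_cases hlt : rc < r'
          · simp only [hlt, if_true]; exact Or.inr ⟨rc, c, rfl, hrc, hrcu⟩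
          · simp only [hlt, if_false]; exact Or.inr ⟨r', c', rfl, hle, heq⟩

-- shifting every rank by +1 shifts the fold result by +1
lemma pvFold_shift (R R' : String → Option Int) (l : List String)
    (h : ∀ c ∈ l, R' c = (R c).map (· + 1)) :
    ∀ b, l.foldl (pvBestStep R') (b.map (fun rc => (rc.1 + 1, rc.2)))
      = (l.foldl (pvBestStep R) b).map (fun rc => (rc.1 + 1, rc.2)) := by
  induction l with
  | nil => intro b; rfl
  | cons c t ih =>
    intro b
    have step : pvBestStep R' (b.map (fun rc => (rc.1 + 1, rc.2))) c
        = (pvBestStep R b c).map (fun rc => (rc.1 + 1, rc.2)) := by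
      unfold pvBestStep
      rw [h c (by simp)]
      cases R c with
      | none => rfl
      | some r =>
        cases b with
        | none => rfl
        | some p =>
          simp only [Option.map_some]
          by_cases hlt : r < p.1
          · simp [hlt, show r + 1 < p.1 + 1 by omega]
          · simp [hlt, show ¬ r + 1 < p.1 + 1 by omega]
    rw [List.foldl_cons, List.foldl_cons, step]
    exact ih (fun x hx => h x (by simp [hx])) _

-- the core: B's min-rank pass finds exactly the slot A's priority scan finds
lemma pvMain (ps : List String) (cand : List String) :
    (cand.foldl (pvBestStep (pvRidx ps)) none).map Prod.snd = pvFindA cand ps := by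
  induction ps generalizing cand with
  | nil =>
    rw [pvFold_none _ _ _ (fun c _ => pvRidx_nil c)]
    cases cand <;> rfl
  | cons p ps ih =>
    by_cases hp : p ∈ cand
    · have : cand.foldl (pvBestStep (pvRidx (p :: ps))) none = some (0, p) := by
        apply pvFold_min _ _ 0 p hp
        · simp [pvRidx_cons]
        · intro c _ rc hR
          rw [pvRidx_cons] at hR
          by_cases h : c = p
          · simp [h] at hR; omega
          · simp only [h, if_false] at hR
            cases hx : pvRidx ps c with
            | none => rw [hx] at hR; simp at hR
            | some n =>
              rw [hx] at hR
              simp at hR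
              have := pvRidx_nonneg ps c n hx
              omega
        · intro c _ hR
          rw [pvRidx_cons] at hR
          by_cases h : c = p
          · exact h
          · simp only [h, if_false] at hR
            cases hx : pvRidx ps c with
            | none => rw [hx] at hR; simp at hR
            | some n =>
              rw [hx] at hR
              simp at hR
              have := pvRidx_nonneg ps c n hx
              omega
        · exact Or.inl rfl
      rw [this]
      have hcp : cand.contains p = true := by simpa using hp
      simp only [pvFindA, hcp, if_true, Option.map_some]
    · have hsh : ∀ c ∈ cand, pvRidx (p :: ps) c = (pvRidx ps c).map (· + 1) := by
        intro c hc
        rw [pvRidx_cons]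
        have : c ≠ p := fun h => hp (h ▸ hc)
        simp [this]
      have := pvFold_shift (pvRidx ps) (pvRidx (p :: ps)) cand hsh none
      simp only [Option.map_none] at this
      have h2 : pvFindA cand (p :: ps) = pvFindA cand ps := by
        have hcp : cand.contains p = false := by simpa using hp
        simp only [pvFindA, hcp, Bool.false_eq_true, if_false]
      rw [this, h2, ← ih cand]
      cases cand.foldl (pvBestStep (pvRidx ps)) none <;> rfl

-- B's rank dict computes pvRidx on the two concrete priority lists
lemma pvRank_movie (c : String) :
    (pvRankDict ["movie", "theater", "date", "time", "tickets"]).get? c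
      = pvRidx ["movie", "theater", "date", "time", "tickets"] c := by
  have h : pvRankDict ["movie", "theater", "date", "time", "tickets"]
      = PySem.Dict.mk [("movie", 0), ("theater", 1), ("date", 2), ("time", 3), ("tickets", 4)] := by
    rfl
  rw [h]
  simp only [PySem.Dict.get?_mk_cons, pvRidx, List.idxOf?, List.findIdx?_cons]
  cases h1 : (("movie" : String) == c) <;> cases h2 : (("theater" : String) == c) <;>
    cases h3 : (("date" : String) == c) <;> cases h4 : (("time" : String) == c) <;>
    cases h5 : (("tickets" : String) == c) <;> simp_all [PySem.Dict.get?]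

lemma pvRank_nav (c : String) :
    (pvRankDict ["destination", "origin", "mode", "avoid", "time"]).get? c
      = pvRidx ["destination", "origin", "mode", "avoid", "time"] c := by
  have h : pvRankDict ["destination", "origin", "mode", "avoid", "time"]
      = PySem.Dict.mk [("destination", 0), ("origin", 1), ("mode", 2), ("avoid", 3), ("time", 4)] := by
    rfl
  rw [h]
  simp only [PySem.Dict.get?_mk_cons, pvRidx, List.idxOf?, List.findIdx?_cons]
  cases h1 : (("destination" : String) == c) <;> cases h2 : (("origin" : String) == c) <;>
    cases h3 : (("mode" : String) == c) <;> cases h4 : (("avoid" : String) == c) <;>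
    cases h5 : (("time" : String) == c) <;> simp_all [PySem.Dict.get?]

lemma pvAgree (ps cand : List String)
    (hR : ∀ c, (pvRankDict ps).get? c = pvRidx ps c) :
    (match cand.foldl (pvBestStep (fun c => (pvRankDict ps).get? c)) none with
      | some b => some b.2
      | none => PySem.List.pyGet? cand 0)
    = (match pvFindA cand ps with
      | some p => some p
      | none => PySem.List.pyGet? cand 0) := by
  have hfun : (fun c => (pvRankDict ps).get? c) = pvRidx ps := funext hR
  rw [hfun]
  have := pvMain ps cand
  cases hf : cand.foldl (pvBestStep (pvRidx ps)) none with
  | none => rw [hf] at this; simp at this; rw [← this]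
  | some b => rw [hf] at this; simp at this; rw [← this]

-- ===== VERDICT (by name: the statement is the Claim_ definition above) =====
theorem choose_next_spec : Claim_equal_choose_next := by
  intro domain mi mb _ hpre
  unfold Spec_choose_next choose_next choose_next_alt
  by_cases hc : mi ++ mb = []
  · simp [hc]
  · simp only [hc, if_false]
    rcases hpre with h | h | h
    · exact absurd h hc
    · subst h
      have hps : pvPolicy.get? "movie" = some ["movie", "theater", "date", "time", "tickets"] := by decide
      rw [hps]
      exact (pvAgree _ (mi ++ mb) pvRank_movie).symm
    · subst h
      have hps : pvPolicy.get? "navigation" = some ["destination", "origin", "mode", "avoid", "time"] := by decide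
      rw [hps]
      exact (pvAgree _ (mi ++ mb) pvRank_nav).symm
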